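-- pv_equiv track=rewrite | github.com/adamek195/Discrete-Control-Systems | projekt3/main.py | target_fun
-- ===== SOURCE A (Python) =====
-- def target_fun(pj,wj,dj,taskNumber):
--     S = []
--     C = []
--     T = []
--
--     S.append(0)
--     C.append(S[0]+pj[0])
--
--     for task in range(1,taskNumber):
--         S.append(C[task-1])
--         C.append(S[task]+pj[task])
--
--     for task in range(0,taskNumber):
--         T.append(max(C[task]-dj[task],0))
--
--     F=0
--     for task in range(0,taskNumber):
--         F += wj[task]*T[task]
--     return F
-- ===== SOURCE B (Python) =====
-- def target_fun(pj, wj, dj, taskNumber):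
--     # One fused pass: running completion time C and running weighted tardiness F.
--     C = 0
--     F = 0
--     for task in range(taskNumber):
--         C += pj[task]
--         F += wj[task] * max(C - dj[task], 0)
--     return F
-- ===== Notes on version B (the rewrite author's own statement) =====
-- stated objective: simpler
-- what changed: Fused A's three passes (building S/C completion-time lists, then a tardiness list T, then a weighted sum) into one loop over tasks that maintains only two scalars, a running completion time and the running weighted-tardiness total; no intermediate lists are built.
import Mathlib
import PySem

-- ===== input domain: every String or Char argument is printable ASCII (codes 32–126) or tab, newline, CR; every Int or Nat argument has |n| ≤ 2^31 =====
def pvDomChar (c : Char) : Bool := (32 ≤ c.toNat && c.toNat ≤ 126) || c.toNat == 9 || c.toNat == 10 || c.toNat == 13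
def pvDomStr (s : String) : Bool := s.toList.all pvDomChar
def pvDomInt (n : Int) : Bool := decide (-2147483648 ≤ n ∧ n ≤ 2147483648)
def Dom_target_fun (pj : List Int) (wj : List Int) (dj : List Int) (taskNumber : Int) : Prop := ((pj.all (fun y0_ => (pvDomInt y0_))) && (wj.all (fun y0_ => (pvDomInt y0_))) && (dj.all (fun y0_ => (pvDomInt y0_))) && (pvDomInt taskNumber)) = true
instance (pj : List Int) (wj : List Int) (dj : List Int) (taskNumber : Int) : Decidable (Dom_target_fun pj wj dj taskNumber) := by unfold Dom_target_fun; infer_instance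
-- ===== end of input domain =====

-- B fuses A's three list-building passes into one loop keeping two scalars (running
-- completion time and running weighted-tardiness total); equivalence is about the return
-- value (neither program mutates its arguments).

-- ===== PORT A =====
-- A-side helper: the body of A's first loop (S.append(C[task-1]); C.append(S[task]+pj[task]))
def stepA (pj : List Int) (sc : List Int × List Int) (task : Int) : List Int × List Int :=
  let S' := sc.1 ++ [PySem.List.pyGetD sc.2 (task - 1) 0]
  let C' := sc.2 ++ [PySem.List.pyGetD S' task 0 + PySem.List.pyGetD pj task 0]
  (S', C')

def target_fun (pj : List Int) (wj : List Int) (dj : List Int) (taskNumber : Int) : Int :=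
  -- S = [0]; C = [S[0] + pj[0]]   (pyGetD: IndexError inputs are excluded by Pre_)
  let S : List Int := [0]
  let C : List Int := [PySem.List.pyGetD S 0 0 + PySem.List.pyGetD pj 0 0]
  -- for task in range(1, taskNumber): S.append(C[task-1]); C.append(S[task] + pj[task])
  let SC : List Int × List Int := (PySem.List.pyRange 1 taskNumber 1).foldl (stepA pj) (S, C)
  -- for task in range(0, taskNumber): T.append(max(C[task] - dj[task], 0))
  let T : List Int :=
    (PySem.List.pyRange 0 taskNumber 1).foldl
      (fun t task => t ++ [max (PySem.List.pyGetD SC.2 task 0 - PySem.List.pyGetD dj task 0) 0]) []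
  -- F = 0; for task in range(0, taskNumber): F += wj[task] * T[task]
  (PySem.List.pyRange 0 taskNumber 1).foldl
    (fun F task => F + PySem.List.pyGetD wj task 0 * PySem.List.pyGetD T task 0) 0

-- ===== PORT B =====
def target_fun_alt (pj : List Int) (wj : List Int) (dj : List Int) (taskNumber : Int) : Int :=
  -- C = 0; F = 0; for task in range(taskNumber): C += pj[task]; F += wj[task]*max(C-dj[task],0)
  ((PySem.List.pyRange 0 taskNumber 1).foldl
    (fun cf task =>
      let c := cf.1 + PySem.List.pyGetD pj task 0
      (c, cf.2 + PySem.List.pyGetD wj task 0 * max (c - PySem.List.pyGetD dj task 0) 0))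
    ((0 : Int), (0 : Int))).2

-- ===== PRECONDITION & SPEC =====
-- Pre_ excludes exactly the inputs where Python A raises IndexError: pj must be nonempty
-- (A reads pj[0] unconditionally) and each list must cover indices 0..taskNumber-1.
def Pre_target_fun (pj : List Int) (wj : List Int) (dj : List Int) (taskNumber : Int) : Prop :=
  pj ≠ [] ∧ taskNumber ≤ (pj.length : Int) ∧ taskNumber ≤ (wj.length : Int) ∧ taskNumber ≤ (dj.length : Int)
instance (pj : List Int) (wj : List Int) (dj : List Int) (taskNumber : Int) : Decidable (Pre_target_fun pj wj dj taskNumber) := by unfold Pre_target_fun; infer_instance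

def pvWitness_target_fun : List Int × List Int × List Int × Int := ([2, 1, 3], [3, 1, 2], [1, 4, 2], 3)

def Spec_target_fun (pj : List Int) (wj : List Int) (dj : List Int) (taskNumber : Int) (out : Int) : Prop := out = target_fun_alt pj wj dj taskNumber
instance (pj : List Int) (wj : List Int) (dj : List Int) (taskNumber : Int) (out : Int) : Decidable (Spec_target_fun pj wj dj taskNumber out) := by unfold Spec_target_fun; infer_instance

-- ===== CLAIM (what is proved, stated in full; the proofs are below) =====
def Claim_equal_target_fun : Prop := ∀ (pj : List Int) (wj : List Int) (dj : List Int) (taskNumber : Int), Dom_target_fun pj wj dj taskNumber → Pre_target_fun pj wj dj taskNumber → Spec_target_fun pj wj dj taskNumber (target_fun pj wj dj taskNumber)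

-- ===== LEMMAS AND PROOFS =====

def csum (pj : List Int) (n : Nat) : Int := ((List.range n).map (fun j => pj.getD j 0)).sum

theorem csum_succ (pj : List Int) (n : Nat) : csum pj (n + 1) = csum pj n + pj.getD n 0 := by
  simp [csum, List.range_succ]

theorem alt_fold (pj wj dj : List Int) (n : Nat) :
    (PySem.List.pyRange 0 (n : Int) 1).foldl
      (fun cf task =>
        let c := cf.1 + PySem.List.pyGetD pj task 0
        (c, cf.2 + PySem.List.pyGetD wj task 0 * max (c - PySem.List.pyGetD dj task 0) 0))
      ((0 : Int), (0 : Int))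
    = (csum pj n,
       ((List.range n).map (fun k => wj.getD k 0 * max (csum pj (k + 1) - dj.getD k 0) 0)).sum) := by
  induction n with
  | zero => simp [PySem.List.pyRange_one_eq_nil (by omega : (0:Int) ≤ 0), csum]
  | succ m ih =>
      have hcast : ((m + 1 : Nat) : Int) = (m : Int) + 1 := by push_cast; ring
      rw [hcast, PySem.List.pyRange_one_succ_right (by positivity), List.foldl_append, ih]
      simp [List.range_succ, csum_succ, PySem.List.pyGetD_natCast]

theorem sc_fold (pj : List Int) (n : Nat) :
    (((PySem.List.pyRange 1 ((n : Int) + 1) 1).foldl (stepA pj)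
        ([0], [PySem.List.pyGetD pj 0 0])).1.length = n + 1)
    ∧ ((PySem.List.pyRange 1 ((n : Int) + 1) 1).foldl (stepA pj)
        ([0], [PySem.List.pyGetD pj 0 0])).2 = (List.range (n + 1)).map (fun k => csum pj (k + 1)) := by
  induction n with
  | zero =>
      rw [PySem.List.pyRange_one_eq_nil (by omega : ((0:Nat) : Int) + 1 ≤ 1)]
      constructor
      · rfl
      · simp [csum, PySem.List.pyGetD_zero]
  | succ m ih =>
      obtain ⟨ihS, ihC⟩ := ih
      have hcast : ((m + 1 : Nat) : Int) + 1 = ((m : Int) + 1) + 1 := by push_cast; ring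
      rw [hcast, PySem.List.pyRange_one_succ_right (by omega : (1:Int) ≤ (m:Int) + 1),
          List.foldl_append, List.foldl_cons, List.foldl_nil]
      set P : List Int × List Int := (PySem.List.pyRange 1 ((m : Int) + 1) 1).foldl (stepA pj)
        ([0], [PySem.List.pyGetD pj 0 0])
      have hsub : ((m : Int) + 1) - 1 = (m : Int) := by ring
      have hC2 : PySem.List.pyGetD P.2 (m : Int) 0 = csum pj (m + 1) := by
        rw [PySem.List.pyGetD_natCast, ihC]
        exact PySem.List.getD_map_range _ (m + 1) m 0 (by omega)
      have hidx : ((m : Int) + 1) = ((m + 1 : Nat) : Int) := by push_cast; ring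
      constructor
      · simp [stepA, hsub, hC2, ihS]
      · have key : ∀ x : Int, (P.1 ++ [x])[m + 1]?.getD 0 = x := by
          intro x; rw [← ihS]; simp
        simp only [stepA, hsub, hC2, hidx, PySem.List.pyGetD_natCast]
        simp only [ihC]
        rw [List.range_succ (n := m + 1)]
        simp [csum_succ]
        exact key _

theorem ports_eq (pj wj dj : List Int) (tN : Int) :
    target_fun pj wj dj tN = target_fun_alt pj wj dj tN := by
  by_cases htN : tN ≤ 0
  · simp only [target_fun, target_fun_alt,
      PySem.List.pyRange_one_eq_nil (by omega : tN ≤ (1:Int)),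
      PySem.List.pyRange_one_eq_nil (by omega : tN ≤ (0:Int)), List.foldl_nil]
  · obtain ⟨n, rfl⟩ : ∃ n : Nat, tN = (n : Int) + 1 := ⟨(tN - 1).toNat, by omega⟩
    have hB := alt_fold pj wj dj (n + 1)
    rw [show ((n + 1 : Nat) : Int) = (n : Int) + 1 by push_cast; ring] at hB
    have hBval : target_fun_alt pj wj dj ((n : Int) + 1)
        = ((List.range (n + 1)).map
            (fun k => wj.getD k 0 * max (csum pj (k + 1) - dj.getD k 0) 0)).sum := by
      simp only [target_fun_alt, hB]
    have hSC := (sc_fold pj n).2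
    simp only [target_fun, PySem.List.pyGetD_zero_cons, zero_add]
    simp only [hSC, PySem.List.foldl_append_singleton_eq_map, List.nil_append]
    have hcong := PySem.List.foldl_congr_mem
      (l := PySem.List.pyRange 0 ((n : Int) + 1) 1)
      (init := (0 : Int))
      (f := fun F task => F + PySem.List.pyGetD wj task 0 *
        PySem.List.pyGetD ((PySem.List.pyRange 0 ((n : Int) + 1) 1).map
          (fun x => max (PySem.List.pyGetD ((List.range (n + 1)).map (fun k => csum pj (k + 1))) x 0
             - PySem.List.pyGetD dj x 0) 0)) task 0)
      (g := fun F task => F + PySem.List.pyGetD wj task 0 *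
        max (PySem.List.pyGetD ((List.range (n + 1)).map (fun k => csum pj (k + 1))) task 0
             - PySem.List.pyGetD dj task 0) 0)
      (by
        intro acc x hx
        rw [PySem.List.mem_pyRange_one] at hx
        dsimp only
        rw [PySem.List.pyGetD_map_pyRange_of_nonneg
          (fun y => max (PySem.List.pyGetD (List.map (fun k => csum pj (k + 1)) (List.range (n + 1))) y 0
            - PySem.List.pyGetD dj y 0) 0) ((n : Int) + 1) x 0 hx.1 hx.2])
    rw [hcong]
    rw [PySem.List.foldl_add
      (g := fun task => PySem.List.pyGetD wj task 0 *
        max (PySem.List.pyGetD ((List.range (n + 1)).map (fun k => csum pj (k + 1))) task 0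
             - PySem.List.pyGetD dj task 0) 0)]
    rw [hBval]
    rw [show ((n : Int) + 1) = ((n + 1 : Nat) : Int) by push_cast; ring,
        PySem.List.pyRange_zero_nat, List.map_map]
    simp only [zero_add]
    congr 1
    apply List.map_congr_left
    intro k hk
    rw [List.mem_range] at hk
    simp only [Function.comp, PySem.List.pyGetD_natCast]
    rw [PySem.List.getD_map_range _ (n + 1) k 0 hk]

-- ===== VERDICT (by name: the statement is the Claim_ definition above) =====
theorem target_fun_spec : Claim_equal_target_fun := by
  intro pj wj dj taskNumber _ _
  unfold Spec_target_fun
  exact ports_eq pj wj dj taskNumber
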